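-- pv_equiv track=rewrite | github.com/ciceciliali/Stock_news_headline_sentiment_analysis | models/bertcnn/final_test.py | get_segs
-- ===== SOURCE A (Python) =====
-- def get_segs(tokens):
--     curr_seg_id=0
--     seg_ids =[]
--     for tok in tokens:
--         seg_ids.append(curr_seg_id)
--         if tok=="[SEP]":
--             curr_seg_id = 1- curr_seg_id
--
--             # 1 becomes 0 and 0 becomes 1
--             # 1 denoting [SEP] token and 0 any other token
--
--     return seg_ids
-- ===== SOURCE B (Python) =====
-- def get_segs(tokens):
--     # block-based: find each [SEP], emit a constant block up to and including it,
--     # flip the id, continue on the remainder; no per-token toggle loop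
--     out = []
--     seg_id = 0
--     rest = tokens
--     while "[SEP]" in rest:
--         k = rest.index("[SEP]")
--         out.extend([seg_id] * (k + 1))
--         seg_id = 1 - seg_id
--         rest = rest[k + 1:]
--     out.extend([seg_id] * len(rest))
--     return out
-- ===== Notes on version B (the rewrite author's own statement) =====
-- stated objective: alternative
-- what changed: Replaces the per-token toggle loop with a block algorithm: repeatedly search for the next [SEP] with list.index, emit a whole constant-id block by list replication, flip the id, and recurse on the remainder.
import Mathlib
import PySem

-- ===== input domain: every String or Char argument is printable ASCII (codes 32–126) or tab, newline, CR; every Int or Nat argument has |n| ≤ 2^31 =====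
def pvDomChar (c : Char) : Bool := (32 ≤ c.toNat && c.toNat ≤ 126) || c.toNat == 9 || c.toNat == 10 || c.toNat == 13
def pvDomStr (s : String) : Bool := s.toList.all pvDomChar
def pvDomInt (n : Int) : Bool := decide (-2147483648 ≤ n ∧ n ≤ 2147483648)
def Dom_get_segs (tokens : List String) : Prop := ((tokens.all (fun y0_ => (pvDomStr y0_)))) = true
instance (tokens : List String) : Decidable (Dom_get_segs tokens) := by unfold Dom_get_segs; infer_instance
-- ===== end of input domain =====

-- B replaces the per-token toggle loop by a block algorithm (search next [SEP], emit a constant block, flip, recurse); alternative decomposition, same values.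

-- ===== PORT A =====
-- loop with state (seg_ids, curr_seg_id); append current id, toggle on "[SEP]"
def get_segs (tokens : List String) : List Int :=
  (tokens.foldl
    (fun (st : List Int × Int) tok =>
      (st.1 ++ [st.2], if tok == "[SEP]" then 1 - st.2 else st.2))
    ([], 0)).1

-- ===== PORT B =====
-- Source B's while loop as recursion on the remainder: membership test, then
-- list.index (under the guard it is List.idxOf, the first occurrence), emit a
-- constant block of k+1 ids, flip the id, continue past the separator
def altGo (rest : List String) (segId : Int) : List Int :=
  if _h : "[SEP]" ∈ rest then
    List.replicate (rest.idxOf "[SEP]" + 1) segId ++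
      altGo (rest.drop (rest.idxOf "[SEP]" + 1)) (1 - segId)
  else
    List.replicate rest.length segId
termination_by rest.length
decreasing_by
  have := List.idxOf_lt_length_of_mem _h
  simp only [List.length_drop]; omega

def get_segs_alt (tokens : List String) : List Int :=
  altGo tokens 0

-- ===== PRECONDITION & SPEC =====
def Spec_get_segs (tokens : List String) (out : List Int) : Prop := out = get_segs_alt tokens
instance (tokens : List String) (out : List Int) : Decidable (Spec_get_segs tokens out) := by unfold Spec_get_segs; infer_instance

-- ===== CLAIM =====
def Claim_equal_get_segs : Prop := ∀ (tokens : List String), Dom_get_segs tokens → Spec_get_segs tokens (get_segs tokens)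

-- ===== LEMMAS AND PROOFS =====

-- recursive rendering of A's loop (current id in, list of emitted ids out)
def segGo (ts : List String) (curr : Int) : List Int :=
  match ts with
  | [] => []
  | t :: ts' => curr :: segGo ts' (if t == "[SEP]" then 1 - curr else curr)

lemma foldl_eq_segGo (ts : List String) (acc : List Int) (curr : Int) :
    (ts.foldl
      (fun (st : List Int × Int) tok =>
        (st.1 ++ [st.2], if tok == "[SEP]" then 1 - st.2 else st.2))
      (acc, curr)).1 = acc ++ segGo ts curr := by
  induction ts generalizing acc curr with
  | nil => simp [segGo]
  | cons t ts ih => simp only [List.foldl_cons, segGo]; rw [ih]; simp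

lemma altGo_cons (t : String) (ts : List String) (c : Int) :
    altGo (t :: ts) c = c :: altGo ts (if t == "[SEP]" then 1 - c else c) := by
  by_cases ht : t = "[SEP]"
  · subst ht
    rw [altGo]
    simp [List.idxOf_cons_self, List.replicate_succ]
  · have hne : t ≠ "[SEP]" := ht
    by_cases hm : "[SEP]" ∈ ts
    · rw [altGo]
      conv_rhs => rw [altGo]
      rw [dif_pos (List.mem_cons_of_mem t hm), dif_pos hm]
      simp [List.idxOf_cons_ne _ hne, List.replicate_succ, beq_false_of_ne ht]
    · have hm' : "[SEP]" ∉ t :: ts := by simp [hm, Ne.symm hne]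
      rw [altGo]
      conv_rhs => rw [altGo]
      rw [dif_neg hm', dif_neg hm]
      simp [List.replicate_succ, beq_false_of_ne ht]

lemma altGo_eq_segGo (ts : List String) (c : Int) : altGo ts c = segGo ts c := by
  induction ts generalizing c with
  | nil => rw [altGo]; simp [segGo]
  | cons t ts ih => rw [altGo_cons, segGo, ih]

-- ===== VERDICT =====
theorem get_segs_spec : Claim_equal_get_segs := by
  intro tokens _
  unfold Spec_get_segs get_segs get_segs_alt
  rw [foldl_eq_segGo, List.nil_append, altGo_eq_segGo]
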